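-- pv_equiv track=rewrite | github.com/BobbyKuzmanov/Py_Fundamentals_May2023 | L06_Mid_Exam/2_the_lift.py | find_place_in_lift
-- ===== SOURCE A (Python) =====
-- def find_place_in_lift(people, lift_state):
--     lift_state = list(map(int, lift_state.split()))
--     total_capacity = len(lift_state) * 4
--     remaining_people = people
--
--     for i in range(len(lift_state)):
--         while lift_state[i] < 4 and remaining_people > 0:
--             lift_state[i] += 1
--             remaining_people -= 1
--
--     if remaining_people > 0:
--         return f"There isn't enough space! {remaining_people} people in a queue!\n{' '.join(map(str, lift_state))}"
--     elif sum(lift_state) < total_capacity: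
--         return f"The lift has empty spots!\n{' '.join(map(str, lift_state))}"
--     else:
--         return ' '.join(map(str, lift_state))
-- ===== SOURCE B (Python) =====
-- def find_place_in_lift(people, lift_state):
--     slots = [int(t) for t in lift_state.split()]
--     caps = [max(0, 4 - x) for x in slots]
--     pref = []
--     total_free = 0
--     for c in caps:
--         pref.append(total_free)
--         total_free += c
--     filled = [x + min(c, max(0, people - p)) for x, c, p in zip(slots, caps, pref)]
--     leftover = people - total_free
--     out = ' '.join(map(str, filled))
--     if leftover > 0:
--         return f"There isn't enough space! {leftover} people in a queue!\n{out}"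
--     if sum(filled) < 4 * len(slots):
--         return f"The lift has empty spots!\n{out}"
--     return out
-- ===== Notes on version B (the rewrite author's own statement) =====
-- stated objective: alternative
-- what changed: The sequential unit-by-unit greedy fill with a running remaining-people counter is replaced by staged passes: compute each slot's free capacity, a prefix-sum pass over those capacities, then each slot's final value independently in closed form from its prefix sum (fill_i = min(cap_i, max(0, people - prefix_i))), with the branch decided from the total free capacity.
-- outside the precondition, e.g. on find_place_in_lift(1, 'x'): A raises ValueError, B raises ValueError
import Mathlib
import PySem

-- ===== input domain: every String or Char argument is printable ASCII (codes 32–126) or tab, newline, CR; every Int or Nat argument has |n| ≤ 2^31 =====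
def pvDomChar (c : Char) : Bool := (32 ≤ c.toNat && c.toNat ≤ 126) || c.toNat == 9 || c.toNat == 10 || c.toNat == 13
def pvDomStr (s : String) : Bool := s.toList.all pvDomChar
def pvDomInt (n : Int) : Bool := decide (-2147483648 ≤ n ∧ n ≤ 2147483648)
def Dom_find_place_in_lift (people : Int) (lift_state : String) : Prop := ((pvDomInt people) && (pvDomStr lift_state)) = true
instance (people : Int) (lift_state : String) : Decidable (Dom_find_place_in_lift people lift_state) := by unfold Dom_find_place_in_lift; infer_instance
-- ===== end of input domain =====

-- B replaces A's sequential unit-by-unit greedy fill by staged passes — free capacities,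
-- their prefix sums, then each slot computed independently in closed form (objective: alternative).

-- shared parsing helper: list(map(int, lift_state.split())); total under Pre_ (every token parses)
def pvParseTokens (s : String) : List Int :=
  (PySem.Str.split₀ s).map (fun t => (PySem.Int.ofStr? t).getD 0)

-- ===== PORT A =====
-- the inner 'while lift_state[i] < 4 and remaining_people > 0' loop
def pvAfill (x rem : Int) : Int × Int :=
  if x < 4 ∧ rem > 0 then pvAfill (x + 1) (rem - 1) else (x, rem)
termination_by (4 - x).toNat
decreasing_by omega

def find_place_in_lift (people : Int) (lift_state : String) : String :=
  let l0 := pvParseTokens lift_state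
  let total_capacity : Int := (l0.length : Int) * 4
  let st := (PySem.List.pyRange 0 (l0.length : Int) 1).foldl
      (fun (st : List Int × Int) i =>
        (PySem.List.pySetD st.1 i (pvAfill (PySem.List.pyGetD st.1 i 0) st.2).1,
         (pvAfill (PySem.List.pyGetD st.1 i 0) st.2).2)) (l0, people)
  let joined := PySem.Str.join " " (st.1.map PySem.Int.toStr)
  if st.2 > 0 then
    "There isn't enough space! " ++ PySem.Int.toStr st.2 ++ " people in a queue!\n" ++ joined
  else if st.1.sum < total_capacity then
    "The lift has empty spots!\n" ++ joined
  else joined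

-- ===== PORT B =====
def find_place_in_lift_alt (people : Int) (lift_state : String) : String :=
  let slots := pvParseTokens lift_state
  let caps := slots.map (fun x => max 0 (4 - x))
  let pf := caps.foldl (fun (st : List Int × Int) c => (st.1 ++ [st.2], st.2 + c)) ([], 0)
  let pref := pf.1
  let total_free := pf.2
  let filled := (slots.zip (caps.zip pref)).map
      (fun q => q.1 + min q.2.1 (max 0 (people - q.2.2)))
  let leftover := people - total_free
  let out := PySem.Str.join " " (filled.map PySem.Int.toStr)
  if leftover > 0 then
    "There isn't enough space! " ++ PySem.Int.toStr leftover ++ " people in a queue!\n" ++ out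
  else if filled.sum < 4 * (slots.length : Int) then
    "The lift has empty spots!\n" ++ out
  else out

-- ===== PRECONDITION & SPEC =====
-- Pre_ excludes inputs where some whitespace-separated token is not an int literal: there A raises ValueError.
def Pre_find_place_in_lift (people : Int) (lift_state : String) : Prop :=
  ∀ t ∈ PySem.Str.split₀ lift_state, (PySem.Int.ofStr? t).isSome

instance (people : Int) (lift_state : String) : Decidable (Pre_find_place_in_lift people lift_state) := by
  unfold Pre_find_place_in_lift; infer_instance

def pvWitness_find_place_in_lift : Int × String := (5, "3 2 0")

def Spec_find_place_in_lift (people : Int) (lift_state : String) (out : String) : Prop :=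
  out = find_place_in_lift_alt people lift_state
instance (people : Int) (lift_state : String) (out : String) : Decidable (Spec_find_place_in_lift people lift_state out) := by unfold Spec_find_place_in_lift; infer_instance

-- ===== CLAIM (what is proved, stated in full; the proofs are below) =====
def Claim_equal_find_place_in_lift : Prop := ∀ (people : Int) (lift_state : String), Dom_find_place_in_lift people lift_state → Pre_find_place_in_lift people lift_state → Spec_find_place_in_lift people lift_state (find_place_in_lift people lift_state)

-- ===== LEMMAS AND PROOFS =====

-- functional reference for A's fill: process the slots left to right greedily
def pvFillSpec : List Int → Int → List Int × Int
  | [], rem => ([], rem)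
  | x :: xs, rem =>
    let d := max 0 (min (4 - x) rem)
    let p := pvFillSpec xs (rem - d)
    ((x + d) :: p.1, p.2)

theorem pvAfill_eq (x rem : Int) :
    pvAfill x rem = (x + max 0 (min (4 - x) rem), rem - max 0 (min (4 - x) rem)) := by
  rw [pvAfill]
  split_ifs with h
  · rw [pvAfill_eq (x + 1) (rem - 1)]
    simp only [Prod.mk.injEq]
    constructor <;> omega
  · simp only [Prod.mk.injEq]
    constructor <;> omega
termination_by (4 - x).toNat
decreasing_by omega

theorem pvA_loop_eq (suf pre : List Int) (rem : Int) :
    (PySem.List.pyRange (pre.length : Int) ((pre.length : Int) + (suf.length : Int)) 1).foldl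
      (fun (st : List Int × Int) i =>
        (PySem.List.pySetD st.1 i (pvAfill (PySem.List.pyGetD st.1 i 0) st.2).1,
         (pvAfill (PySem.List.pyGetD st.1 i 0) st.2).2)) (pre ++ suf, rem)
    = (pre ++ (pvFillSpec suf rem).1, (pvFillSpec suf rem).2) := by
  induction suf generalizing pre rem with
  | nil =>
    rw [PySem.List.pyRange_one_eq_nil (by simp)]
    simp [pvFillSpec]
  | cons x xs ih =>
    rw [PySem.List.pyRange_one_cons (by simp)]
    simp only [List.foldl_cons]
    have hget : PySem.List.pyGetD (pre ++ x :: xs) (pre.length : Int) 0 = x := by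
      simp [PySem.List.pyGetD_natCast, List.getD_eq_getElem?_getD]
    have hset : PySem.List.pySetD (pre ++ x :: xs) (pre.length : Int)
        (pvAfill x rem).1 = pre ++ (pvAfill x rem).1 :: xs := by
      simp [PySem.List.pySetD_natCast]
    rw [hget, hset, pvAfill_eq]
    have := ih (pre ++ [x + max 0 (min (4 - x) rem)]) (rem - max 0 (min (4 - x) rem))
    simp only [List.append_assoc, List.singleton_append, List.length_append,
      List.length_singleton] at this
    rw [show ((pre.length : Int) + 1) = ((pre.length + 1 : Nat) : Int) by omega,
      show (pre.length : Int) + (↑(x :: xs).length : Int) = ((pre.length + 1 : Nat) : Int) + (xs.length : Int) by simp; ring]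
    rw [this]
    simp [pvFillSpec]

-- prefix list produced by B's prefix-sum pass, starting from s
def pvPrefList : List Int → Int → List Int
  | [], _ => []
  | c :: cs, s => s :: pvPrefList cs (s + c)

theorem pvB_pref_eq (cs : List Int) (acc : List Int) (s : Int) :
    cs.foldl (fun (st : List Int × Int) c => (st.1 ++ [st.2], st.2 + c)) (acc, s)
    = (acc ++ pvPrefList cs s, s + cs.sum) := by
  induction cs generalizing acc s with
  | nil => simp [pvPrefList]
  | cons c cs ih => simp [pvPrefList, ih]; ring

-- a nonpositive remainder adds nothing, whatever its exact value
theorem pvFillSpec_nonpos (xs : List Int) (r1 r2 : Int) (h1 : r1 ≤ 0) (h2 : r2 ≤ 0) :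
    (pvFillSpec xs r1).1 = (pvFillSpec xs r2).1 := by
  induction xs generalizing r1 r2 with
  | nil => simp [pvFillSpec]
  | cons x xs ih =>
    simp only [pvFillSpec]
    have e1 : max 0 (min (4 - x) r1) = 0 := by omega
    have e2 : max 0 (min (4 - x) r2) = 0 := by omega
    rw [e1, e2]
    simp only [sub_zero]
    simp [ih r1 r2 h1 h2]

-- B's closed-form per-slot values equal A's greedy fill
theorem pvB_fill_eq (xs : List Int) (people s : Int) :
    ((xs.zip ((xs.map (fun x => max 0 (4 - x))).zip (pvPrefList (xs.map (fun x => max 0 (4 - x))) s))).map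
      (fun q => q.1 + min q.2.1 (max 0 (people - q.2.2))))
    = (pvFillSpec xs (people - s)).1 := by
  induction xs generalizing s with
  | nil => simp [pvFillSpec]
  | cons x xs ih =>
    simp only [List.map_cons, pvPrefList, List.zip_cons_cons, pvFillSpec]
    have hhead : x + min (max 0 (4 - x)) (max 0 (people - s))
        = x + max 0 (min (4 - x) (people - s)) := by omega
    rw [hhead]
    congr 1
    rw [ih (s + max 0 (4 - x))]
    set r := people - s with hr
    set c := max 0 (4 - x) with hc
    set d := max 0 (min (4 - x) r) with hd
    by_cases hcase : c ≤ r
    · have : people - (s + c) = r - d := by omega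
      rw [this]
    · exact pvFillSpec_nonpos xs (people - (s + c)) (r - d) (by omega) (by omega)

def pvCapSum (xs : List Int) : Int := (xs.map (fun x => max 0 (4 - x))).sum

theorem pvCapSum_nonneg (xs : List Int) : 0 ≤ pvCapSum xs := by
  induction xs with
  | nil => simp [pvCapSum]
  | cons x xs ih => simp only [pvCapSum, List.map_cons, List.sum_cons] at *; omega

theorem pvFillSpec_snd (xs : List Int) (rem : Int) :
    (pvFillSpec xs rem).2 = max (rem - pvCapSum xs) (min rem 0) := by
  induction xs generalizing rem with
  | nil => simp [pvFillSpec, pvCapSum]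
  | cons x xs ih =>
    simp only [pvFillSpec]
    rw [ih]
    have := pvCapSum_nonneg xs
    simp only [pvCapSum, List.map_cons, List.sum_cons] at this ⊢
    omega

-- ===== VERDICT (by name: the statement is the Claim_ definition above) =====
theorem find_place_in_lift_spec : Claim_equal_find_place_in_lift := by
  intro people lift_state _ _
  have hA := pvA_loop_eq (pvParseTokens lift_state) [] people
  simp only [List.length_nil, Nat.cast_zero, zero_add, List.nil_append] at hA
  simp only [Spec_find_place_in_lift, find_place_in_lift, find_place_in_lift_alt]
  rw [hA, pvB_pref_eq]
  simp only [List.nil_append, zero_add]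
  rw [pvB_fill_eq (pvParseTokens lift_state) people 0]
  rw [pvFillSpec_snd]
  set xs := pvParseTokens lift_state with hxs
  have hcap := pvCapSum_nonneg xs
  have hsum : (xs.map (fun x => max 0 (4 - x))).sum = pvCapSum xs := rfl
  rw [hsum]
  have hrem : people - 0 = people := by ring
  rw [hrem]
  by_cases h : people - pvCapSum xs > 0
  · have h1 : max (people - pvCapSum xs) (min people 0) = people - pvCapSum xs := by omega
    rw [h1, if_pos h, if_pos h]
  · have h1 : ¬ (max (people - pvCapSum xs) (min people 0) > 0) := by omega
    rw [if_neg h1, if_neg h]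
    rw [show ((xs.length : Int)) * 4 = 4 * (xs.length : Int) from by ring]
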